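-- pv_equiv track=rewrite | github.com/nixternal/CodingChallenges | Codyssi/2025/08.py | reduce_line
-- ===== SOURCE A (Python) =====
-- def reduce_line(line: str, allow_hyphen: bool) -> str:
--     """
--     Reduces a given line by removing character pairs based on the specified
--     rules.
--
--     Rules:
--     - If a digit is next to a letter, both are removed.
--     - If `allow_hyphen` is True, a digit next to a hyphen also results in
--       both being removed.
--     - Reductions occur one at a time from left to right.
--
--     Args:
--         line (str): The input line to be reduced.
--         allow_hyphen (bool): Whether hyphen reductions should be allowed.
--
--     Returns:
--         str: The reduced line after all possible reductions are performed.
--     """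
--
--     stack = []  # Stack to process character removals in sequence
--
--     for char in line:
--         # Check if the current character forms a removable pair with the last
--         # stacked character
--         if stack and (
--                 (char.isdigit() and (stack[-1].isalpha() or
--                                      (allow_hyphen and stack[-1] == '-'))) or
--                 (char.isalpha() and stack[-1].isdigit()) or
--                 (char == '-' and stack[-1].isdigit() and allow_hyphen)):
--             stack.pop()  # Remove the last character (perform reduction)
--         else:
--             stack.append(char)  # Keep the character
--
--     return ''.join(stack)  # Return the fully reduced string
-- ===== SOURCE B (Python) =====
-- def reduce_line(line: str, allow_hyphen: bool) -> str:
--     """Repeatedly delete the leftmost removable adjacent pair until none remains."""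
--     def removable(prev, cur):
--         return ((cur.isdigit() and (prev.isalpha() or (allow_hyphen and prev == '-'))) or
--                 (cur.isalpha() and prev.isdigit()) or
--                 (cur == '-' and prev.isdigit() and allow_hyphen))
--
--     while True:
--         for i in range(len(line) - 1):
--             if removable(line[i], line[i + 1]):
--                 line = line[:i] + line[i + 2:]
--                 break
--         else:
--             return line
-- ===== Notes on version B (the rewrite author's own statement) =====
-- stated objective: alternative
-- what changed: Replaced A's single left-to-right pass with an explicit stack by a fixpoint loop that repeatedly rescans the string and deletes the leftmost removable adjacent pair until none remains.
import Mathlib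
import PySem

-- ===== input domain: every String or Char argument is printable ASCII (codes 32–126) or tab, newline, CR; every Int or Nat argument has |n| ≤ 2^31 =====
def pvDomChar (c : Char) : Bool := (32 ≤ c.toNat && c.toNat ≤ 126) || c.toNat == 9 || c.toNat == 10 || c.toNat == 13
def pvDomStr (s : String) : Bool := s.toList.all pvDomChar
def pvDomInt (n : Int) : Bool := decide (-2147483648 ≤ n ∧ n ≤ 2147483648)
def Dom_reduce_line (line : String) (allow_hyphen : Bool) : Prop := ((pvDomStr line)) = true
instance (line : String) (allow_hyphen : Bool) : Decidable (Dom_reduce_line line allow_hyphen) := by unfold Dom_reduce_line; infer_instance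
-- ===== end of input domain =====

-- B replaces A's single-pass stack with repeated leftmost-pair deletion (restart-scan loop); objective: alternative decomposition, same result.

-- the shared removable-pair test (prev is the earlier character, cur the later one)
def pvRem (ah : Bool) (prev cur : Char) : Bool :=
  (PySem.Chars.isdigit cur && (PySem.Chars.isalpha prev || (ah && prev == '-'))) ||
  (PySem.Chars.isalpha cur && PySem.Chars.isdigit prev) ||
  (cur == '-' && PySem.Chars.isdigit prev && ah)

-- ===== PORT A =====
-- A's for-loop over the line; the stack is kept reversed (head = Python stack[-1]) and reversed back at the end (Python's ''.join(stack)).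
def pvStackRun (ah : Bool) : List Char → List Char → List Char
  | st, [] => st
  | [], c :: cs => pvStackRun ah [c] cs
  | t :: rest, c :: cs =>
    if pvRem ah t c then pvStackRun ah rest cs
    else pvStackRun ah (c :: t :: rest) cs

def reduce_line (line : String) (allow_hyphen : Bool) : String :=
  String.mk ((pvStackRun allow_hyphen [] line.toList).reverse)

-- ===== PORT B =====
-- one scan of B's inner for-loop: delete the leftmost removable adjacent pair (line[:i] + line[i+2:]), none if a full scan finds no pair
def pvScan (ah : Bool) : List Char → Option (List Char)
  | [] => none
  | [_] => none
  | a :: b :: rest =>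
    if pvRem ah a b then some rest
    else (pvScan ah (b :: rest)).map (a :: ·)

theorem pvScan_length {ah : Bool} : ∀ {cs cs' : List Char}, pvScan ah cs = some cs' → cs'.length < cs.length
  | [], _, h => by simp [pvScan] at h
  | [_], _, h => by simp [pvScan] at h
  | a :: b :: rest, cs', h => by
    simp only [pvScan] at h
    split at h
    · cases h; simp
    · rcases Option.map_eq_some_iff.mp h with ⟨t, ht, rfl⟩
      have := pvScan_length ht
      simp only [List.length_cons] at *
      omega

-- B's outer while-loop: rescan from the start until no change occurs
def pvLoop (ah : Bool) (cs : List Char) : List Char :=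
  match h : pvScan ah cs with
  | none => cs
  | some cs' => pvLoop ah cs'
termination_by cs.length
decreasing_by exact pvScan_length h

def reduce_line_alt (line : String) (allow_hyphen : Bool) : String :=
  String.mk (pvLoop allow_hyphen line.toList)

-- ===== PRECONDITION & SPEC =====
def Spec_reduce_line (line : String) (allow_hyphen : Bool) (out : String) : Prop := out = reduce_line_alt line allow_hyphen
instance (line : String) (allow_hyphen : Bool) (out : String) : Decidable (Spec_reduce_line line allow_hyphen out) := by unfold Spec_reduce_line; infer_instance

-- ===== CLAIM (what is proved, stated in full; the proofs are below) =====
def Claim_equal_reduce_line : Prop := ∀ (line : String) (allow_hyphen : Bool), Dom_reduce_line line allow_hyphen → Spec_reduce_line line allow_hyphen (reduce_line line allow_hyphen)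

-- ===== LEMMAS AND PROOFS =====

-- no removable pair anywhere: the stack loop pushes everything
theorem pvStackRun_of_scan_none {ah : Bool} : ∀ (cs st : List Char),
    pvScan ah cs = none →
    (∀ h c, st.head? = some h → cs.head? = some c → pvRem ah h c = false) →
    pvStackRun ah st cs = cs.reverse ++ st := by
  intro cs
  induction cs with
  | nil => intro st _ _; cases st <;> simp [pvStackRun]
  | cons a tail ih =>
    intro st hscan hhead
    have hpush : pvStackRun ah st (a :: tail) = pvStackRun ah (a :: st) tail := by
      cases st with
      | nil => simp [pvStackRun]
      | cons t r =>
        have := hhead t a (by simp) (by simp)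
        simp [pvStackRun, this]
    rw [hpush]
    cases tail with
    | nil => simp [pvStackRun]
    | cons b rest =>
      have hab : pvRem ah a b = false := by
        simp only [pvScan] at hscan
        by_contra hne
        simp [eq_true_of_ne_false hne] at hscan
      have htail : pvScan ah (b :: rest) = none := by
        simp only [pvScan, hab] at hscan
        simpa using hscan
      have := ih (a :: st) htail (by
        intro h c hh hc
        simp at hh hc
        subst hh; subst hc; exact hab)
      rw [this]; simp

-- one leftmost deletion does not change what the stack loop computes
theorem pvStackRun_of_scan_some {ah : Bool} : ∀ (cs cs' st : List Char),
    pvScan ah cs = some cs' →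
    (∀ h c, st.head? = some h → cs.head? = some c → pvRem ah h c = false) →
    pvStackRun ah st cs = pvStackRun ah st cs' := by
  intro cs
  induction cs with
  | nil => intro cs' st h _; simp [pvScan] at h
  | cons a tail ih =>
    intro cs' st hscan hhead
    cases tail with
    | nil => simp [pvScan] at hscan
    | cons b rest =>
      have hpush : pvStackRun ah st (a :: b :: rest) = pvStackRun ah (a :: st) (b :: rest) := by
        cases st with
        | nil => simp [pvStackRun]
        | cons t r =>
          have := hhead t a (by simp) (by simp)
          simp [pvStackRun, this]
      by_cases hab : pvRem ah a b = true
      · have hcs' : cs' = rest := by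
          simp [pvScan, hab] at hscan
          exact hscan.symm
        subst hcs'
        rw [hpush]
        simp [pvStackRun, hab]
      · have hab' : pvRem ah a b = false := by simpa using hab
        simp [pvScan, hab'] at hscan
        rcases hscan with ⟨t, ht, rfl⟩
        rw [hpush]
        rw [ih t (a :: st) ht (by intro h c hh hc; simp at hh hc; subst hh; subst hc; exact hab')]
        have h2 : pvStackRun ah st (a :: t) = pvStackRun ah (a :: st) t := by
          cases st with
          | nil => simp [pvStackRun]
          | cons u r =>
            have := hhead u a (by simp) (by simp)
            simp [pvStackRun, this]
        rw [h2]

-- B's loop computes the reverse of A's final stack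
theorem pvLoop_eq_rev {ah : Bool} (cs : List Char) :
    pvLoop ah cs = (pvStackRun ah [] cs).reverse := by
  rw [pvLoop]
  split
  · next hnone =>
      rw [pvStackRun_of_scan_none cs [] hnone (by simp)]
      simp
  · next cs' hsome =>
      rw [pvLoop_eq_rev cs', ← pvStackRun_of_scan_some cs cs' [] hsome (by simp)]
termination_by cs.length
decreasing_by exact pvScan_length (by assumption)

-- ===== VERDICT (by name: the statement is the Claim_ definition above) =====
theorem reduce_line_spec : Claim_equal_reduce_line := by
  intro line ah _
  unfold Spec_reduce_line reduce_line reduce_line_alt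
  rw [pvLoop_eq_rev]
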